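-- pv_equiv track=rewrite | github.com/charlie-jd-f/create-an-account | CreateAnAccount.py | check_street_name
-- ===== SOURCE A (Python) =====
-- def check_street_name(street_name):
--     flag = True
--
--     # Create a list which contains each word
--     split_address = street_name.split()
--
--     # Check that each section of the address only contains a
--     # letter or a number
--     for item in split_address:
--         if item.isalnum() == False:
--             flag = False
--             break
--     return flag
-- ===== SOURCE B (Python) =====
-- def check_street_name(street_name):
--     # Character-level check: a string splits into all-alphanumeric words
--     # iff every character is alphanumeric or whitespace.
--     return all(c.isalnum() or c.isspace() for c in street_name)
-- ===== Notes on version B (the rewrite author's own statement) =====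
-- stated objective: simpler
-- what changed: B drops the split-into-words pass and the per-word isalnum loop with break, and instead scans the raw string once, character by character, accepting iff each character is alphanumeric or whitespace.
import Mathlib
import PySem

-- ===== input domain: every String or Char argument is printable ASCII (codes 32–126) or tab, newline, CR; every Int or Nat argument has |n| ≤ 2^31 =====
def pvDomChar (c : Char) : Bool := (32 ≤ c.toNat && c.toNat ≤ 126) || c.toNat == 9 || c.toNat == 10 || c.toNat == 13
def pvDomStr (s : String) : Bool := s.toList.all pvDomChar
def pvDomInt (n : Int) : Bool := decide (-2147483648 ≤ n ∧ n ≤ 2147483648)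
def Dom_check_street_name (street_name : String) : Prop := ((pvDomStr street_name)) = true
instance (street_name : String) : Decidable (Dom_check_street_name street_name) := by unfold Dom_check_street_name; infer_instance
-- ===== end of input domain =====

-- B replaces the split/word loop by a single character scan (alnum-or-space); return value equivalence proved below.
-- ===== PORT A =====
-- the 'for item in split_address: if item.isalnum() == False: flag=False; break' loop
def pvLoopA : List String → Bool
  | [] => true
  | item :: rest => if (PySem.Str.strIsalnum item == false) then false else pvLoopA rest

def check_street_name (street_name : String) : Bool :=
  let split_address := PySem.Str.split₀ street_name
  pvLoopA split_address

-- ===== PORT B =====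
def check_street_name_alt (street_name : String) : Bool :=
  street_name.toList.all (fun c => PySem.Chars.isalnum c || PySem.Chars.isspace c)

-- ===== PRECONDITION & SPEC =====
def Spec_check_street_name (street_name : String) (out : Bool) : Prop := out = check_street_name_alt street_name
instance (street_name : String) (out : Bool) : Decidable (Spec_check_street_name street_name out) := by unfold Spec_check_street_name; infer_instance

-- ===== CLAIM (what is proved, stated in full; the proofs are below) =====
def Claim_equal_check_street_name : Prop := ∀ (street_name : String), Dom_check_street_name street_name → Spec_check_street_name street_name (check_street_name street_name)

-- ===== LEMMAS AND PROOFS =====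
lemma pvLoopA_eq_all (ws : List String) : pvLoopA ws = ws.all PySem.Str.strIsalnum := by
  induction ws with
  | nil => rfl
  | cons w rest ih =>
    simp only [pvLoopA, List.all_cons, ih]
    cases h : PySem.Str.strIsalnum w <;> simp

lemma pv_isspace_not_isalnum (c : Char) (h : PySem.Chars.isspace c = true) :
    PySem.Chars.isalnum c = false := by
  have h0 : '0'.val.toNat = 48 := rfl
  have h9 : '9'.val.toNat = 57 := rfl
  have hA : 'A'.val.toNat = 65 := rfl
  have hZ : 'Z'.val.toNat = 90 := rfl
  have ha : 'a'.val.toNat = 97 := rfl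
  have hz : 'z'.val.toNat = 122 := rfl
  simp only [PySem.Chars.isspace, PySem.Chars.isalnum, PySem.Chars.isalpha,
    PySem.Chars.isdigit, PySem.Chars.isupper, PySem.Chars.islower, Char.le_def,
    Char.toNat, UInt32.le_iff_toNat_le, h0, h9, hA, hZ, ha, hz,
    Bool.or_eq_true, Bool.and_eq_true, decide_eq_true_eq, Bool.or_eq_false_iff,
    Bool.and_eq_false_iff, decide_eq_false_iff_not] at h ⊢
  omega

lemma pv_word (cur : List Char) (h : cur.isEmpty = false) :
    PySem.Chars.strIsalnum cur.reverse = cur.all PySem.Chars.isalnum := by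
  simp [PySem.Chars.strIsalnum, List.isEmpty_reverse, h]

lemma pv_go_all (s cur : List Char) (acc : List (List Char)) :
    ((PySem.Chars.split₀.go s cur acc).all PySem.Chars.strIsalnum) =
      (acc.all PySem.Chars.strIsalnum && cur.all PySem.Chars.isalnum &&
        s.all (fun c => PySem.Chars.isalnum c || PySem.Chars.isspace c)) := by
  induction s generalizing cur acc with
  | nil =>
    by_cases h : cur.isEmpty = true
    · simp [PySem.Chars.split₀.go, List.isEmpty_iff.mp h]
    · have h' : cur.isEmpty = false := by
        cases hv : cur.isEmpty
        · rfl
        · exact absurd hv h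
      simp [PySem.Chars.split₀.go, h', pv_word cur h', Bool.and_comm]

  | cons c rest ih =>
    have hgo : PySem.Chars.split₀.go (c :: rest) cur acc =
        (if PySem.Chars.isspace c = true then
          (if cur.isEmpty = true then PySem.Chars.split₀.go rest [] acc
           else PySem.Chars.split₀.go rest [] (cur.reverse :: acc))
         else PySem.Chars.split₀.go rest (c :: cur) acc) := rfl
    rw [hgo]
    by_cases hs : PySem.Chars.isspace c = true
    · have hna := pv_isspace_not_isalnum c hs
      by_cases hc : cur.isEmpty = true
      · simp [hs, ih, List.isEmpty_iff.mp hc, hna]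
      · have hc' : cur.isEmpty = false := by
          cases hv : cur.isEmpty
          · rfl
          · exact absurd hv hc
        simp only [hs, hc', if_true, if_false, Bool.false_eq_true, ih, List.all_cons,
          pv_word cur hc', List.all_nil, Bool.and_true, hna, Bool.or_true]
        cases acc.all PySem.Chars.strIsalnum <;>
          cases cur.all PySem.Chars.isalnum <;> simp
    · have hs' : PySem.Chars.isspace c = false := by
        cases hv : PySem.Chars.isspace c
        · rfl
        · exact absurd hv hs
      simp only [hs', Bool.false_eq_true, if_false, ih, List.all_cons, Bool.or_false]
      cases acc.all PySem.Chars.strIsalnum <;> cases PySem.Chars.isalnum c <;>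
        cases cur.all PySem.Chars.isalnum <;> simp

-- ===== VERDICT (by name: the statement is the Claim_ definition above) =====
theorem check_street_name_spec : Claim_equal_check_street_name := by
  intro s _
  show check_street_name s = check_street_name_alt s
  simp only [check_street_name, check_street_name_alt, pvLoopA_eq_all]
  calc (PySem.Str.split₀ s).all PySem.Str.strIsalnum
      = ((PySem.Str.split₀ s).map String.toList).all PySem.Chars.strIsalnum := by
        rw [List.all_map]
        exact List.all_congr rfl (fun w => by
          rw [Function.comp_apply, PySem.Str.strIsalnum_eq])
    _ = (PySem.Chars.split₀ s.toList).all PySem.Chars.strIsalnum := by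
        rw [PySem.Str.split₀_map_toList]
    _ = s.toList.all (fun c => PySem.Chars.isalnum c || PySem.Chars.isspace c) := by
        rw [PySem.Chars.split₀]
        simp [pv_go_all]
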